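-- pv_equiv track=rewrite | github.com/Bast-94/THEG_2022 | 21-03-22/ex4.py | adjlists
-- ===== SOURCE A (Python) =====
-- def adjlists(n, edges, matchingedges):
--     succ_matching = [[] for i in range(n)]
--     succ_nonmatching = [[] for i in range(n)]
--     for (a,b) in edges:
--         s = succ_matching if (a,b) in matchingedges else succ_nonmatching
--         s[a].append(b)
--         s[b].append(a)
--     return succ_matching, succ_nonmatching
-- ===== SOURCE B (Python) =====
-- def adjlists(n, edges, matchingedges):
--     # Partition edges first, then build each adjacency array in its own branch-free loop.
--     inmatch = set(matchingedges)
--     matching = [e for e in edges if e in inmatch]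
--     nonmatching = [e for e in edges if e not in inmatch]
--
--     def build(es):
--         succ = [[] for _ in range(n)]
--         for (a, b) in es:
--             succ[a].append(b)
--             succ[b].append(a)
--         return succ
--
--     return build(matching), build(nonmatching)
-- ===== Notes on version B (the rewrite author's own statement) =====
-- stated objective: alternative
-- what changed: Replaces the single loop that selects a target array per edge by a partition of the edges into matching/non-matching followed by two dedicated branch-free build loops (with a set for the membership test).
import Mathlib
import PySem

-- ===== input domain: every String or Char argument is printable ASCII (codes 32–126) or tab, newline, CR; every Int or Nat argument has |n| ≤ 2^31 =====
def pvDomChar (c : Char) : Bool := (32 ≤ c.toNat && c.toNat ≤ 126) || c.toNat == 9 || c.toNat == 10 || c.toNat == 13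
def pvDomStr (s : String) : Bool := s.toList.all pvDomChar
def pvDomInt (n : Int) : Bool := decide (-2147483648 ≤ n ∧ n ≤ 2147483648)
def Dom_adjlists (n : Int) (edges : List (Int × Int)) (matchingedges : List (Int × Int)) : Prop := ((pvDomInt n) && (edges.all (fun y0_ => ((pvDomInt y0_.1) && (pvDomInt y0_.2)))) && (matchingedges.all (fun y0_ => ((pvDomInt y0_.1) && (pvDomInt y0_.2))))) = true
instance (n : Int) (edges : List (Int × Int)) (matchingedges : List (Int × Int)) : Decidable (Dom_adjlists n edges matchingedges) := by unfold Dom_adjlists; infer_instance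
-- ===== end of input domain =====

-- B separates classification from construction: partition edges by matching-ness, then two branch-free build loops (return-value equivalence; A mutates only its own fresh lists).
-- ===== PORT A =====
-- s[i].append(v) with Python's negative-index wrap (valid under Pre_)
def pvBump (n : Int) (s : List (List Int)) (i v : Int) : List (List Int) :=
  let j := (if i < 0 then i + n else i).toNat
  s.set j ((s.getD j []) ++ [v])

def adjlists (n : Int) (edges : List (Int × Int)) (matchingedges : List (Int × Int)) : List (List Int) × List (List Int) :=
  edges.foldl (fun st e =>
      if matchingedges.contains e then
        (pvBump n (pvBump n st.1 e.1 e.2) e.2 e.1, st.2)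
      else
        (st.1, pvBump n (pvBump n st.2 e.1 e.2) e.2 e.1))
    (List.replicate n.toNat [], List.replicate n.toNat [])

-- ===== PORT B =====
def pvBuild (n : Int) (es : List (Int × Int)) : List (List Int) :=
  es.foldl (fun s e => pvBump n (pvBump n s e.1 e.2) e.2 e.1) (List.replicate n.toNat [])

def adjlists_alt (n : Int) (edges : List (Int × Int)) (matchingedges : List (Int × Int)) : List (List Int) × List (List Int) :=
  let inmatch := PySem.Set.ofList matchingedges
  let matching := edges.filter (fun e => inmatch.contains e)
  let nonmatching := edges.filter (fun e => !inmatch.contains e)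
  (pvBuild n matching, pvBuild n nonmatching)

-- ===== PRECONDITION & SPEC =====
-- Pre_ excludes exactly the inputs on which Python A raises IndexError: an edge endpoint outside [-n, n).
def Pre_adjlists (n : Int) (edges : List (Int × Int)) (matchingedges : List (Int × Int)) : Prop :=
  ∀ e ∈ edges, -n ≤ e.1 ∧ e.1 < n ∧ -n ≤ e.2 ∧ e.2 < n
instance (n : Int) (edges : List (Int × Int)) (matchingedges : List (Int × Int)) : Decidable (Pre_adjlists n edges matchingedges) := by unfold Pre_adjlists; infer_instance
def pvWitness_adjlists : Int × (List (Int × Int)) × (List (Int × Int)) := (3, [(0, 1), (1, -2), (2, 2)], [(1, -2)])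

def Spec_adjlists (n : Int) (edges : List (Int × Int)) (matchingedges : List (Int × Int)) (out : List (List Int) × List (List Int)) : Prop := out = adjlists_alt n edges matchingedges
instance (n : Int) (edges : List (Int × Int)) (matchingedges : List (Int × Int)) (out : List (List Int) × List (List Int)) : Decidable (Spec_adjlists n edges matchingedges out) := by unfold Spec_adjlists; infer_instance

-- ===== CLAIM (what is proved, stated in full; the proofs are below) =====
def Claim_equal_adjlists : Prop := ∀ (n : Int) (edges : List (Int × Int)) (matchingedges : List (Int × Int)), Dom_adjlists n edges matchingedges → Pre_adjlists n edges matchingedges → Spec_adjlists n edges matchingedges (adjlists n edges matchingedges)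

-- ===== LEMMAS AND PROOFS =====
theorem mem_set_ofList {e : Int × Int} (l : List (Int × Int)) :
    (PySem.Set.ofList l).contains e = l.contains e := by
  simp [PySem.Set.mem_ofList]

theorem fold_split (n : Int) (p : Int × Int → Bool) :
    ∀ (edges : List (Int × Int)) (sm snm : List (List Int)),
      edges.foldl (fun st e =>
          if p e then
            (pvBump n (pvBump n st.1 e.1 e.2) e.2 e.1, st.2)
          else
            (st.1, pvBump n (pvBump n st.2 e.1 e.2) e.2 e.1)) (sm, snm)
        = ((edges.filter p).foldl (fun s e => pvBump n (pvBump n s e.1 e.2) e.2 e.1) sm,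
           (edges.filter (fun e => !p e)).foldl (fun s e => pvBump n (pvBump n s e.1 e.2) e.2 e.1) snm) := by
  intro edges
  induction edges with
  | nil => intro sm snm; simp
  | cons e tl ih =>
    intro sm snm
    by_cases h : p e = true <;> simp [List.foldl, List.filter, h, ih]

-- ===== VERDICT (by name: the statement is the Claim_ definition above) =====
theorem adjlists_spec : Claim_equal_adjlists := by
  intro n edges matchingedges _ _
  unfold Spec_adjlists adjlists adjlists_alt pvBuild
  simp only [mem_set_ofList]
  exact fold_split n _ edges _ _
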